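-- pv_equiv track=rewrite | github.com/Jaeyeop-Jung/CodingTest | 백준/다이나믹프로그래밍/Top-down/11062.py | dfs
-- ===== SOURCE A (Python) =====
-- def dfs(me, arr, dp, left, right):
--     if right < left:
--         return 0
--     if dp[left][right] != -1:
--         return dp[left][right]
--
--     # 나
--     if me:
--         dp[left][right] = max(
--             dfs(False, arr, dp, left + 1, right) + arr[left],
--             dfs(False, arr, dp, left, right - 1) + arr[right]
--         )
--     # 상대방
--     else:
--         dp[left][right] = min(
--             dfs(True, arr, dp, left + 1, right),
--             dfs(True, arr, dp, left, right - 1)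
--         )
--
--     return dp[left][right]
-- ===== SOURCE B (Python) =====
-- def dfs(me, arr, dp, left, right):
--     if right < left:
--         return 0
--     if dp[left][right] != -1:
--         return dp[left][right]
--     n = right - left
--     for L in range(0, n + 1):
--         for l in range(left, right - L + 1):
--             r = l + L
--             if dp[l][r] == -1:
--                 turn = me ^ ((n - L) % 2 == 1)
--                 if L == 0:
--                     dp[l][r] = arr[l] if turn else 0
--                 elif turn:
--                     dp[l][r] = max(dp[l + 1][r] + arr[l], dp[l][r - 1] + arr[r])
--                 else:
--                     dp[l][r] = min(dp[l + 1][r], dp[l][r - 1])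
--     return dp[left][right]
-- ===== Notes on version B (the rewrite author's own statement) =====
-- stated objective: alternative
-- what changed: Top-down memoized recursion replaced by bottom-up tabulation: loop over interval lengths, computing each unfilled dp cell from already-computed shorter intervals with the turn derived from a parity formula (equivalence is about the return value; both fill dp in place, B fills the whole sub-triangle).
-- outside the precondition, e.g. on dfs(True, [1, 2], [[-1, -1], [-1, -1]], -2, 1): A returns 3, B returns 2
import Mathlib
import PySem

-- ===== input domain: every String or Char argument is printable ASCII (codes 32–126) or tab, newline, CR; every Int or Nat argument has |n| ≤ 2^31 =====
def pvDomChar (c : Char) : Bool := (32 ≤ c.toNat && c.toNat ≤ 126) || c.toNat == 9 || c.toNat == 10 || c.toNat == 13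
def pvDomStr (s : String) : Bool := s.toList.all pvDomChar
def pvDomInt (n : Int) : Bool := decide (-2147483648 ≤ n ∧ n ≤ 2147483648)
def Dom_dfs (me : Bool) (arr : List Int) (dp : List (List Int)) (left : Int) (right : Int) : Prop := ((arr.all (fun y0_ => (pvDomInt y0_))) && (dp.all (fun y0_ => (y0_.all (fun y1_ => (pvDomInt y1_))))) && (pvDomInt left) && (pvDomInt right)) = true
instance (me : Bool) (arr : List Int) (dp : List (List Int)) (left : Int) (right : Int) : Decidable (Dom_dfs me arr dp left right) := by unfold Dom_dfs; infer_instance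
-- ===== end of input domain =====

-- B replaces A's top-down memoized recursion by bottom-up tabulation over interval lengths
-- (alternative decomposition, same cost); equivalence is about the RETURN value — both
-- mutate dp in place in Python, but B fills the whole sub-triangle while A fills only needed cells.


-- ===== PORT A =====
-- dp[l][r] read; total via defaults, exact under Pre_ (indices in range there)
def pvGet2 (dp : List (List Int)) (l r : Int) : Int :=
  PySem.List.pyGetD (PySem.List.pyGetD dp l []) r 0

-- dp[l][r] = v; exact under Pre_ (indices in range, rows not aliased)
def pvSet2 (dp : List (List Int)) (l r : Int) (v : Int) : List (List Int) :=
  PySem.List.pySetD dp l (PySem.List.pySetD (PySem.List.pyGetD dp l []) r v)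

-- state-threading transliteration of A: returns (updated dp, return value)
def dfsA (me : Bool) (arr : List Int) (dp : List (List Int)) (left right : Int) :
    List (List Int) × Int :=
  if right < left then (dp, 0)
  else if pvGet2 dp left right ≠ -1 then (dp, pvGet2 dp left right)
  else if me then
    let p1 := dfsA false arr dp (left + 1) right
    let p2 := dfsA false arr p1.1 left (right - 1)
    let dp' := pvSet2 p2.1 left right
      (max (p1.2 + PySem.List.pyGetD arr left 0) (p2.2 + PySem.List.pyGetD arr right 0))
    (dp', pvGet2 dp' left right)
  else
    let p1 := dfsA true arr dp (left + 1) right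
    let p2 := dfsA true arr p1.1 left (right - 1)
    let dp' := pvSet2 p2.1 left right (min p1.2 p2.2)
    (dp', pvGet2 dp' left right)
termination_by (right - left + 1).toNat
decreasing_by all_goals omega

def dfs (me : Bool) (arr : List Int) (dp : List (List Int)) (left : Int) (right : Int) : Int :=
  (dfsA me arr dp left right).2

-- ===== PORT B =====
def dfs_alt (me : Bool) (arr : List Int) (dp : List (List Int)) (left : Int) (right : Int) : Int :=
  if right < left then 0
  else if pvGet2 dp left right ≠ -1 then pvGet2 dp left right
  else
    let n := right - left
    let dpf := (PySem.List.pyRange 0 (n + 1) 1).foldl (fun dpacc L =>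
      (PySem.List.pyRange left (right - L + 1) 1).foldl (fun dpa l =>
        let r := l + L
        if pvGet2 dpa l r = -1 then
          let turn := xor me (decide ((n - L) % 2 = 1))
          let v :=
            if L = 0 then (if turn then PySem.List.pyGetD arr l 0 else 0)
            else if turn then
              max (pvGet2 dpa (l + 1) r + PySem.List.pyGetD arr l 0)
                  (pvGet2 dpa l (r - 1) + PySem.List.pyGetD arr r 0)
            else min (pvGet2 dpa (l + 1) r) (pvGet2 dpa l (r - 1))
          pvSet2 dpa l r v
        else dpa) dpacc) dp
    pvGet2 dpf left right

-- ===== PRECONDITION & SPEC =====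
-- Pre_ excludes inputs with left ≤ right where an index is negative or out of range for arr/dp:
-- there A either raises IndexError or returns a value produced by Python negative-index
-- wraparound aliasing rows of dp, an accident of A's in-place memo table.
def Pre_dfs (me : Bool) (arr : List Int) (dp : List (List Int)) (left : Int) (right : Int) : Prop :=
  right < left ∨
    (0 ≤ left ∧ right < (arr.length : Int) ∧ right < (dp.length : Int) ∧
      ∀ row ∈ dp, right < (row.length : Int))
instance (me : Bool) (arr : List Int) (dp : List (List Int)) (left : Int) (right : Int) : Decidable (Pre_dfs me arr dp left right) := by unfold Pre_dfs; infer_instance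

def pvWitness_dfs : Bool × List Int × List (List Int) × Int × Int :=
  (true, [3, 1, 2], [[-1, -1, -1], [-1, 7, -1], [-1, -1, -1]], 0, 2)

def Spec_dfs (me : Bool) (arr : List Int) (dp : List (List Int)) (left : Int) (right : Int) (out : Int) : Prop := out = dfs_alt me arr dp left right
instance (me : Bool) (arr : List Int) (dp : List (List Int)) (left : Int) (right : Int) (out : Int) : Decidable (Spec_dfs me arr dp left right out) := by unfold Spec_dfs; infer_instance

-- ===== CLAIM (what is proved, stated in full; the proofs are below) =====
def Claim_equal_dfs : Prop := ∀ (me : Bool) (arr : List Int) (dp : List (List Int)) (left : Int) (right : Int), Dom_dfs me arr dp left right → Pre_dfs me arr dp left right → Spec_dfs me arr dp left right (dfs me arr dp left right)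

-- ===== LEMMAS AND PROOFS =====

-- the turn holding at cell (l, r) when the root call is (me, left, right)
def pvT (me : Bool) (left right l r : Int) : Bool :=
  xor me (decide ((left + right - l - r) % 2 = 1))

-- the pure cell value both programs agree on: pre-filled value if ≠ -1, else the game recurrence
def pvV (t : Bool) (arr : List Int) (dp0 : List (List Int)) (l r : Int) : Int :=
  if r < l then 0
  else if pvGet2 dp0 l r ≠ -1 then pvGet2 dp0 l r
  else if t then
    max (pvV false arr dp0 (l + 1) r + PySem.List.pyGetD arr l 0)
        (pvV false arr dp0 l (r - 1) + PySem.List.pyGetD arr r 0)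
  else min (pvV true arr dp0 (l + 1) r) (pvV true arr dp0 l (r - 1))
termination_by (r - l + 1).toNat
decreasing_by all_goals omega

-- small getD/set facts
theorem pv_pyGetD_nonneg {α : Type} (xs : List α) (i : Int) (d : α) (h : 0 ≤ i) :
    PySem.List.pyGetD xs i d = xs.getD i.toNat d := by
  simp [PySem.List.pyGetD, PySem.List.pyGet?_of_nonneg _ h, List.getD]

theorem pv_getD_set_self {α : Type} (xs : List α) (n : Nat) (v d : α) (h : n < xs.length) :
    (xs.set n v).getD n d = v := by
  simp [List.getD, h]

theorem pv_getD_set_ne {α : Type} (xs : List α) (n m : Nat) (v d : α) (h : n ≠ m) :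
    (xs.set n v).getD m d = xs.getD m d := by
  simp [List.getD, h]

theorem pvGet2_eq (dp : List (List Int)) (l r : Int) (hl : 0 ≤ l) (hr : 0 ≤ r) :
    pvGet2 dp l r = (dp.getD l.toNat []).getD r.toNat 0 := by
  simp [pvGet2, pv_pyGetD_nonneg _ _ _ hl, pv_pyGetD_nonneg _ _ _ hr]

theorem pvSet2_eq (dp : List (List Int)) (l r : Int) (v : Int) (hl : 0 ≤ l) (hr : 0 ≤ r) :
    pvSet2 dp l r v = dp.set l.toNat ((dp.getD l.toNat []).set r.toNat v) := by
  rw [pvSet2, pv_pyGetD_nonneg _ _ _ hl, PySem.List.pySetD_of_nonneg _ _ hr,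
    PySem.List.pySetD_of_nonneg _ _ hl]

-- row lengths preserved
def pvShape (dp0 dp : List (List Int)) : Prop :=
  dp.length = dp0.length ∧ ∀ i : Nat, (dp.getD i []).length = (dp0.getD i []).length

theorem pvShape_refl (dp0 : List (List Int)) : pvShape dp0 dp0 := ⟨rfl, fun _ => rfl⟩

theorem pvShape_set2 (dp0 dp : List (List Int)) (l r : Int) (v : Int)
    (hl : 0 ≤ l) (hr : 0 ≤ r) (hlen : l.toNat < dp.length) (hS : pvShape dp0 dp) :
    pvShape dp0 (pvSet2 dp l r v) := by
  rw [pvSet2_eq _ _ _ _ hl hr]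
  refine ⟨by simpa using hS.1, fun i => ?_⟩
  by_cases hi : i = l.toNat
  · subst hi
    rw [pv_getD_set_self _ _ _ _ hlen]
    simpa using hS.2 l.toNat
  · rw [pv_getD_set_ne _ _ _ _ _ (fun h => hi h.symm)]
    exact hS.2 i

theorem pvGet2_set2 (dp : List (List Int)) (l r l' r' : Int) (v : Int)
    (hl : 0 ≤ l) (hr : 0 ≤ r) (hl' : 0 ≤ l') (hr' : 0 ≤ r')
    (hlen : l.toNat < dp.length) (hrow : r.toNat < (dp.getD l.toNat []).length) :
    pvGet2 (pvSet2 dp l r v) l' r' = if l' = l ∧ r' = r then v else pvGet2 dp l' r' := by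
  rw [pvSet2_eq _ _ _ _ hl hr, pvGet2_eq _ _ _ hl' hr', pvGet2_eq _ _ _ hl' hr']
  by_cases h1 : l' = l
  · subst h1
    rw [pv_getD_set_self _ _ _ _ hlen]
    by_cases h2 : r' = r
    · subst h2
      rw [pv_getD_set_self _ _ _ _ hrow]
      simp
    · have hne : (r.toNat : Nat) ≠ r'.toNat := by omega
      rw [pv_getD_set_ne _ _ _ _ _ hne]
      simp [h2]
  · have hne : (l.toNat : Nat) ≠ l'.toNat := by omega
    rw [pv_getD_set_ne _ _ _ _ _ hne]
    simp [h1]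

-- turn parity
theorem pvT_root (me : Bool) (left right : Int) : pvT me left right left right = me := by
  unfold pvT
  have h : left + right - left - right = 0 := by ring
  rw [h]; norm_num

theorem pvT_l (me : Bool) (left right l r : Int) :
    pvT me left right (l + 1) r = !(pvT me left right l r) := by
  unfold pvT
  have h2 : decide ((left + right - (l + 1) - r) % 2 = 1)
      = !decide ((left + right - l - r) % 2 = 1) := by
    by_cases hp : (left + right - l - r) % 2 = 1 <;> simp [hp] <;> omega
  rw [h2]
  cases me <;> cases hb : decide ((left + right - l - r) % 2 = 1) <;> simp

theorem pvT_r (me : Bool) (left right l r : Int) :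
    pvT me left right l (r - 1) = !(pvT me left right l r) := by
  unfold pvT
  have h2 : decide ((left + right - l - (r - 1)) % 2 = 1)
      = !decide ((left + right - l - r) % 2 = 1) := by
    by_cases hp : (left + right - l - r) % 2 = 1 <;> simp [hp] <;> omega
  rw [h2]
  cases me <;> cases hb : decide ((left + right - l - r) % 2 = 1) <;> simp

-- pvV unfolding
theorem pvV_lt (t : Bool) (arr : List Int) (dp0 : List (List Int)) (l r : Int) (h : r < l) :
    pvV t arr dp0 l r = 0 := by
  rw [pvV]; simp [h]

theorem pvV_memo (t : Bool) (arr : List Int) (dp0 : List (List Int)) (l r : Int)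
    (h : ¬ r < l) (hm : pvGet2 dp0 l r ≠ -1) : pvV t arr dp0 l r = pvGet2 dp0 l r := by
  rw [pvV]; simp [h, hm]

theorem pvV_rec (t : Bool) (arr : List Int) (dp0 : List (List Int)) (l r : Int)
    (h : ¬ r < l) (hm : pvGet2 dp0 l r = -1) :
    pvV t arr dp0 l r =
      if t then
        max (pvV false arr dp0 (l + 1) r + PySem.List.pyGetD arr l 0)
            (pvV false arr dp0 l (r - 1) + PySem.List.pyGetD arr r 0)
      else min (pvV true arr dp0 (l + 1) r) (pvV true arr dp0 l (r - 1)) := by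
  rw [pvV]; simp [h, hm]

-- invariant of A's threaded memo table: each in-triangle cell holds its original
-- value or its pvV value
def pvGood (me : Bool) (arr : List Int) (dp0 : List (List Int)) (left right : Int)
    (dp : List (List Int)) : Prop :=
  pvShape dp0 dp ∧ ∀ l r : Int, left ≤ l → l ≤ r → r ≤ right →
    pvGet2 dp l r = pvGet2 dp0 l r ∨
    pvGet2 dp l r = pvV (pvT me left right l r) arr dp0 l r

theorem pvGood_cell (me : Bool) (arr : List Int) (dp0 : List (List Int)) (left right : Int)
    (dp : List (List Int)) (l r : Int) (hG : pvGood me arr dp0 left right dp)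
    (h1 : left ≤ l) (h2 : l ≤ r) (h3 : r ≤ right) :
    (pvGet2 dp l r ≠ -1 → pvGet2 dp l r = pvV (pvT me left right l r) arr dp0 l r) ∧
    (pvGet2 dp l r = -1 → pvGet2 dp0 l r = -1) := by
  have hlr : ¬ r < l := by omega
  by_cases hm : pvGet2 dp0 l r = -1
  · rcases hG.2 l r h1 h2 h3 with h | h
    · exact ⟨fun hne => absurd (h.trans hm) hne, fun _ => hm⟩
    · exact ⟨fun _ => h, fun _ => hm⟩
  · have hv : pvV (pvT me left right l r) arr dp0 l r = pvGet2 dp0 l r :=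
      pvV_memo _ _ _ _ _ hlr hm
    rcases hG.2 l r h1 h2 h3 with h | h
    · exact ⟨fun _ => by rw [h, hv], fun he => by rw [← h]; exact he⟩
    · exact ⟨fun _ => h, fun he => absurd (by rw [← hv, ← h]; exact he) hm⟩

theorem pvA_main (me : Bool) (arr : List Int) (dp0 : List (List Int)) (left right : Int)
    (hl0 : 0 ≤ left) (hrD : right < (dp0.length : Int))
    (hrows : ∀ i : Nat, i < dp0.length → right < ((dp0.getD i []).length : Int)) :
    ∀ (k : Nat) (t : Bool) (l r : Int) (dp : List (List Int)),
      (r - l + 1).toNat ≤ k → left ≤ l → r ≤ right → t = pvT me left right l r →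
      pvGood me arr dp0 left right dp →
      (dfsA t arr dp l r).2 = pvV t arr dp0 l r ∧
      pvGood me arr dp0 left right (dfsA t arr dp l r).1 := by
  intro k
  induction k with
  | zero =>
    intro t l r dp hk hll hrr ht hG
    have hlr : r < l := by omega
    rw [dfsA]
    simp only [if_pos hlr]
    exact ⟨(pvV_lt _ _ _ _ _ hlr).symm, hG⟩
  | succ k ih =>
    intro t l r dp hk hll hrr ht hG
    by_cases hlr : r < l
    · rw [dfsA]
      simp only [if_pos hlr]
      exact ⟨(pvV_lt _ _ _ _ _ hlr).symm, hG⟩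
    · have hcell := pvGood_cell me arr dp0 left right dp l r hG hll (by omega) hrr
      by_cases hc : pvGet2 dp l r = -1
      · -- memo miss: recurse
        have hdp0 : pvGet2 dp0 l r = -1 := hcell.2 hc
        have hk1 : (r - (l + 1) + 1).toNat ≤ k := by omega
        have hk2 : (r - 1 - l + 1).toNat ≤ k := by omega
        have ht1 : (!t) = pvT me left right (l + 1) r := by rw [pvT_l, ← ht]
        have ht2 : (!t) = pvT me left right l (r - 1) := by rw [pvT_r, ← ht]
        have h1 := ih (!t) (l + 1) r dp hk1 (by omega) hrr ht1 hG
        have h2 := ih (!t) l (r - 1) (dfsA (!t) arr dp (l + 1) r).1 hk2 hll (by omega) ht2 h1.2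
        have hSh := h2.2.1
        have hl' : 0 ≤ l := by omega
        have hr' : 0 ≤ r := by omega
        have hlenD : l.toNat < (dfsA (!t) arr (dfsA (!t) arr dp (l + 1) r).1 l (r - 1)).1.length := by
          rw [hSh.1]; omega
        have hrowD : r.toNat <
            ((dfsA (!t) arr (dfsA (!t) arr dp (l + 1) r).1 l (r - 1)).1.getD l.toNat []).length := by
          rw [hSh.2 l.toNat]
          have hx := hrows l.toNat (by omega)
          omega
        rw [dfsA]
        rw [if_neg hlr, if_neg (show ¬ pvGet2 dp l r ≠ -1 from by simp [hc])]
        cases t with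
        | true =>
          simp only [Bool.not_true] at h1 h2 hSh hlenD hrowD
          rw [if_pos rfl]
          dsimp only
          have hget := pvGet2_set2 (dfsA false arr (dfsA false arr dp (l + 1) r).1 l (r - 1)).1
            l r l r (max ((dfsA false arr dp (l + 1) r).2 + PySem.List.pyGetD arr l 0)
              ((dfsA false arr (dfsA false arr dp (l + 1) r).1 l (r - 1)).2 + PySem.List.pyGetD arr r 0))
            hl' hr' hl' hr' hlenD hrowD
          rw [if_pos ⟨rfl, rfl⟩] at hget
          have hVeq : max ((dfsA false arr dp (l + 1) r).2 + PySem.List.pyGetD arr l 0)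
              ((dfsA false arr (dfsA false arr dp (l + 1) r).1 l (r - 1)).2 + PySem.List.pyGetD arr r 0)
              = pvV true arr dp0 l r := by
            rw [pvV_rec true arr dp0 l r hlr hdp0, if_pos rfl, h1.1, h2.1]
          constructor
          · rw [hget, hVeq]
          · refine ⟨pvShape_set2 _ _ _ _ _ hl' hr' hlenD hSh, ?_⟩
            intro l' r' b1 b2 b3
            have hl'' : 0 ≤ l' := by omega
            have hr'' : 0 ≤ r' := by omega
            rw [pvGet2_set2 _ _ _ _ _ _ hl' hr' hl'' hr'' hlenD hrowD]
            by_cases hcase : l' = l ∧ r' = r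
            · rw [if_pos hcase]
              right
              rw [hcase.1, hcase.2, ← ht, hVeq]
            · rw [if_neg hcase]
              exact h2.2.2 l' r' b1 b2 b3
        | false =>
          simp only [Bool.not_false] at h1 h2 hSh hlenD hrowD
          rw [if_neg (by simp)]
          dsimp only
          have hget := pvGet2_set2 (dfsA true arr (dfsA true arr dp (l + 1) r).1 l (r - 1)).1
            l r l r (min ((dfsA true arr dp (l + 1) r).2)
              ((dfsA true arr (dfsA true arr dp (l + 1) r).1 l (r - 1)).2))
            hl' hr' hl' hr' hlenD hrowD
          rw [if_pos ⟨rfl, rfl⟩] at hget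
          have hVeq : min ((dfsA true arr dp (l + 1) r).2)
              ((dfsA true arr (dfsA true arr dp (l + 1) r).1 l (r - 1)).2)
              = pvV false arr dp0 l r := by
            rw [pvV_rec false arr dp0 l r hlr hdp0, if_neg (by simp), h1.1, h2.1]
          constructor
          · rw [hget, hVeq]
          · refine ⟨pvShape_set2 _ _ _ _ _ hl' hr' hlenD hSh, ?_⟩
            intro l' r' b1 b2 b3
            have hl'' : 0 ≤ l' := by omega
            have hr'' : 0 ≤ r' := by omega
            rw [pvGet2_set2 _ _ _ _ _ _ hl' hr' hl'' hr'' hlenD hrowD]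
            by_cases hcase : l' = l ∧ r' = r
            · rw [if_pos hcase]
              right
              rw [hcase.1, hcase.2, ← ht, hVeq]
            · rw [if_neg hcase]
              exact h2.2.2 l' r' b1 b2 b3
      · -- memo hit: the stored value is already pvV
        have hv := hcell.1 hc
        rw [dfsA]
        rw [if_neg hlr, if_pos hc]
        exact ⟨ht ▸ hv, hG⟩

-- B's inner loop body, named for the fold lemmas (identical to the lambda in dfs_alt)
def pvBody (me : Bool) (arr : List Int) (n L : Int) (dpa : List (List Int)) (l : Int) :
    List (List Int) :=
  let r := l + L
  if pvGet2 dpa l r = -1 then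
    let turn := xor me (decide ((n - L) % 2 = 1))
    let v :=
      if L = 0 then (if turn then PySem.List.pyGetD arr l 0 else 0)
      else if turn then
        max (pvGet2 dpa (l + 1) r + PySem.List.pyGetD arr l 0)
            (pvGet2 dpa l (r - 1) + PySem.List.pyGetD arr r 0)
      else min (pvGet2 dpa (l + 1) r) (pvGet2 dpa l (r - 1))
    pvSet2 dpa l r v
  else dpa

theorem dfs_alt_eq (me : Bool) (arr : List Int) (dp : List (List Int)) (left right : Int) :
    dfs_alt me arr dp left right =
      if right < left then 0
      else if pvGet2 dp left right ≠ -1 then pvGet2 dp left right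
      else pvGet2 ((PySem.List.pyRange 0 (right - left + 1) 1).foldl
          (fun dpacc L => (PySem.List.pyRange left (right - L + 1) 1).foldl
            (pvBody me arr (right - left) L) dpacc) dp) left right := rfl

-- outer invariant: all intervals shorter than L are tabulated, longer ones untouched
def pvInvO (me : Bool) (arr : List Int) (dp0 : List (List Int)) (left right L : Int)
    (dp : List (List Int)) : Prop :=
  pvShape dp0 dp ∧ ∀ l r : Int, left ≤ l → l ≤ r → r ≤ right →
    (r - l < L → pvGet2 dp l r = pvV (pvT me left right l r) arr dp0 l r) ∧
    (L ≤ r - l → pvGet2 dp l r = pvGet2 dp0 l r)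

-- inner invariant: lengths < L done, length L done for starts < lb, rest untouched
def pvInvI (me : Bool) (arr : List Int) (dp0 : List (List Int)) (left right L lb : Int)
    (dp : List (List Int)) : Prop :=
  pvShape dp0 dp ∧ ∀ l r : Int, left ≤ l → l ≤ r → r ≤ right →
    ((r - l < L ∨ (r - l = L ∧ l < lb)) →
      pvGet2 dp l r = pvV (pvT me left right l r) arr dp0 l r) ∧
    ((L < r - l ∨ (r - l = L ∧ lb ≤ l)) → pvGet2 dp l r = pvGet2 dp0 l r)

theorem pvB_step (me : Bool) (arr : List Int) (dp0 : List (List Int)) (left right : Int)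
    (hl0 : 0 ≤ left) (hrD : right < (dp0.length : Int))
    (hrows : ∀ i : Nat, i < dp0.length → right < ((dp0.getD i []).length : Int))
    (L l : Int) (dp : List (List Int)) (hL : 0 ≤ L) (hll : left ≤ l) (hlLr : l + L ≤ right)
    (hI : pvInvI me arr dp0 left right L l dp) :
    pvInvI me arr dp0 left right L (l + 1) (pvBody me arr (right - left) L dp l) := by
  have hl' : 0 ≤ l := by omega
  have hr' : 0 ≤ l + L := by omega
  have hun : pvGet2 dp l (l + L) = pvGet2 dp0 l (l + L) :=
    (hI.2 l (l + L) hll (by omega) (by omega)).2 (Or.inr ⟨by omega, le_refl l⟩)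
  unfold pvBody
  by_cases hm : pvGet2 dp l (l + L) = -1
  · -- cell still -1: compute it
    rw [if_pos hm]
    have hdp0 : pvGet2 dp0 l (l + L) = -1 := hun ▸ hm
    have hturn : xor me (decide ((right - left - L) % 2 = 1)) = pvT me left right l (l + L) := by
      unfold pvT
      rw [decide_eq_decide.mpr (by omega :
        (right - left - L) % 2 = 1 ↔ (left + right - l - (l + L)) % 2 = 1)]
    have hlenD : l.toNat < dp.length := by rw [hI.1.1]; omega
    have hrowD : l.toNat < dp0.length := by omega
    have hrowL : (l + L).toNat < (dp.getD l.toNat []).length := by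
      rw [hI.1.2 l.toNat]
      have hx := hrows l.toNat hrowD
      omega
    have hVeq :
        (if L = 0 then (if xor me (decide ((right - left - L) % 2 = 1)) then PySem.List.pyGetD arr l 0 else 0)
         else if xor me (decide ((right - left - L) % 2 = 1)) then
           max (pvGet2 dp (l + 1) (l + L) + PySem.List.pyGetD arr l 0)
               (pvGet2 dp l (l + L - 1) + PySem.List.pyGetD arr (l + L) 0)
         else min (pvGet2 dp (l + 1) (l + L)) (pvGet2 dp l (l + L - 1)))
        = pvV (pvT me left right l (l + L)) arr dp0 l (l + L) := by
      rw [hturn]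
      rw [pvV_rec _ arr dp0 l (l + L) (by omega) hdp0]
      by_cases hL0 : L = 0
      · subst hL0
        rw [if_pos rfl]
        have hz1 : ∀ t : Bool, pvV t arr dp0 (l + 1) l = 0 := fun t => pvV_lt _ _ _ _ _ (by omega)
        have hz2 : ∀ t : Bool, pvV t arr dp0 l (l - 1) = 0 := fun t => pvV_lt _ _ _ _ _ (by omega)
        cases pvT me left right l (l + 0) <;> simp [hz1, hz2]
      · rw [if_neg hL0]
        have hch1 : pvGet2 dp (l + 1) (l + L) =
            pvV (pvT me left right (l + 1) (l + L)) arr dp0 (l + 1) (l + L) :=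
          (hI.2 (l + 1) (l + L) (by omega) (by omega) (by omega)).1 (Or.inl (by omega))
        have hch2 : pvGet2 dp l (l + L - 1) =
            pvV (pvT me left right l (l + L - 1)) arr dp0 l (l + L - 1) :=
          (hI.2 l (l + L - 1) hll (by omega) (by omega)).1 (Or.inl (by omega))
        rw [hch1, hch2, pvT_l, pvT_r]
        cases pvT me left right l (l + L) <;> simp
    constructor
    · exact pvShape_set2 _ _ _ _ _ hl' hr' hlenD hI.1
    · intro l' r' b1 b2 b3
      have hl'' : 0 ≤ l' := by omega
      have hr'' : 0 ≤ r' := by omega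
      rw [pvGet2_set2 _ _ _ _ _ _ hl' hr' hl'' hr'' hlenD hrowL]
      by_cases hcase : l' = l ∧ r' = l + L
      · rw [if_pos hcase]
        refine ⟨fun _ => ?_, fun hbad => ?_⟩
        · rw [hcase.1, hcase.2, hVeq]
        · exfalso; omega
      · rw [if_neg hcase]
        have hold := hI.2 l' r' b1 b2 b3
        refine ⟨fun hp => ?_, fun hq => ?_⟩
        · rcases hp with hp | ⟨he, hlt⟩
          · exact hold.1 (Or.inl hp)
          · by_cases hll' : l' < l
            · exact hold.1 (Or.inr ⟨he, hll'⟩)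
            · exfalso
              exact hcase ⟨by omega, by omega⟩
        · rcases hq with hq | ⟨he, hge⟩
          · exact hold.2 (Or.inl hq)
          · exact hold.2 (Or.inr ⟨he, by omega⟩)
  · -- cell pre-filled: skip, it already holds its pvV value
    rw [if_neg hm]
    refine ⟨hI.1, fun l' r' b1 b2 b3 => ?_⟩
    have hold := hI.2 l' r' b1 b2 b3
    refine ⟨fun hp => ?_, fun hq => ?_⟩
    · rcases hp with hp | ⟨he, hlt⟩
      · exact hold.1 (Or.inl hp)
      · by_cases hll' : l' < l
        · exact hold.1 (Or.inr ⟨he, hll'⟩)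
        · have hc2 : l' = l ∧ r' = l + L := ⟨by omega, by omega⟩
          rw [hc2.1, hc2.2, hun]
          rw [pvV_memo _ _ _ _ _ (by omega) (by rw [← hun]; exact hm)]
    · rcases hq with hq | ⟨he, hge⟩
      · exact hold.2 (Or.inl hq)
      · exact hold.2 (Or.inr ⟨he, by omega⟩)

theorem pvB_inner (me : Bool) (arr : List Int) (dp0 : List (List Int)) (left right : Int)
    (hl0 : 0 ≤ left) (hrD : right < (dp0.length : Int))
    (hrows : ∀ i : Nat, i < dp0.length → right < ((dp0.getD i []).length : Int))
    (L : Int) (hL : 0 ≤ L) :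
    ∀ (cnt : Nat) (lb : Int) (dp : List (List Int)),
      (right - L + 1 - lb).toNat ≤ cnt → left ≤ lb →
      pvInvI me arr dp0 left right L lb dp →
      pvInvO me arr dp0 left right (L + 1)
        ((PySem.List.pyRange lb (right - L + 1) 1).foldl (pvBody me arr (right - left) L) dp) := by
  intro cnt
  induction cnt with
  | zero =>
    intro lb dp hc hlb hI
    have hnil : right - L + 1 ≤ lb := by omega
    rw [PySem.List.pyRange_one_eq_nil hnil, List.foldl_nil]
    refine ⟨hI.1, fun l r b1 b2 b3 => ?_⟩
    have hold := hI.2 l r b1 b2 b3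
    refine ⟨fun hp => ?_, fun hq => hold.2 (Or.inl (by omega))⟩
    by_cases h1 : r - l < L
    · exact hold.1 (Or.inl h1)
    · exact hold.1 (Or.inr ⟨by omega, by omega⟩)
  | succ cnt ih =>
    intro lb dp hc hlb hI
    by_cases hnil : right - L + 1 ≤ lb
    · rw [PySem.List.pyRange_one_eq_nil hnil, List.foldl_nil]
      refine ⟨hI.1, fun l r b1 b2 b3 => ?_⟩
      have hold := hI.2 l r b1 b2 b3
      refine ⟨fun hp => ?_, fun hq => hold.2 (Or.inl (by omega))⟩
      by_cases h1 : r - l < L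
      · exact hold.1 (Or.inl h1)
      · exact hold.1 (Or.inr ⟨by omega, by omega⟩)
    · rw [PySem.List.pyRange_one_cons (by omega), List.foldl_cons]
      exact ih (lb + 1) (pvBody me arr (right - left) L dp lb) (by omega) (by omega)
        (pvB_step me arr dp0 left right hl0 hrD hrows L lb dp hL hlb (by omega) hI)

theorem pvInvO_succ_of_InvI (me : Bool) (arr : List Int) (dp0 : List (List Int))
    (left right L : Int) (dp : List (List Int))
    (hI : pvInvO me arr dp0 left right L dp) :
    pvInvI me arr dp0 left right L left dp := by
  refine ⟨hI.1, fun l r b1 b2 b3 => ?_⟩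
  have hold := hI.2 l r b1 b2 b3
  exact ⟨fun hp => hold.1 (by omega), fun hq => hold.2 (by omega)⟩

theorem pvB_outer (me : Bool) (arr : List Int) (dp0 : List (List Int)) (left right : Int)
    (hl0 : 0 ≤ left) (hrD : right < (dp0.length : Int))
    (hrows : ∀ i : Nat, i < dp0.length → right < ((dp0.getD i []).length : Int)) :
    ∀ (cnt : Nat) (L : Int) (dp : List (List Int)),
      (right - left + 1 - L).toNat ≤ cnt → 0 ≤ L →
      pvInvO me arr dp0 left right L dp →
      pvInvO me arr dp0 left right (right - left + 1)
        ((PySem.List.pyRange L (right - left + 1) 1).foldl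
          (fun dpacc L' => (PySem.List.pyRange left (right - L' + 1) 1).foldl
            (pvBody me arr (right - left) L') dpacc) dp) := by
  intro cnt
  induction cnt with
  | zero =>
    intro L dp hc hL hI
    have hnil : right - left + 1 ≤ L := by omega
    rw [PySem.List.pyRange_one_eq_nil hnil, List.foldl_nil]
    refine ⟨hI.1, fun l r b1 b2 b3 => ?_⟩
    have hold := hI.2 l r b1 b2 b3
    exact ⟨fun hp => hold.1 (by omega), fun hq => hold.2 (by omega)⟩
  | succ cnt ih =>
    intro L dp hc hL hI
    by_cases hnil : right - left + 1 ≤ L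
    · rw [PySem.List.pyRange_one_eq_nil hnil, List.foldl_nil]
      refine ⟨hI.1, fun l r b1 b2 b3 => ?_⟩
      have hold := hI.2 l r b1 b2 b3
      exact ⟨fun hp => hold.1 (by omega), fun hq => hold.2 (by omega)⟩
    · rw [PySem.List.pyRange_one_cons (by omega), List.foldl_cons]
      exact ih (L + 1) _ (by omega) (by omega)
        (pvB_inner me arr dp0 left right hl0 hrD hrows L hL
          (right - L + 1 - left).toNat left dp (le_refl _) (le_refl _)
          (pvInvO_succ_of_InvI me arr dp0 left right L dp hI))

-- ===== VERDICT (by name: the statement is the Claim_ definition above) =====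
theorem dfs_spec : Claim_equal_dfs := by
  intro me arr dp left right hDom hPre
  unfold Spec_dfs
  by_cases hlr : right < left
  · rw [dfs_alt_eq, if_pos hlr]
    unfold dfs
    rw [dfsA, if_pos hlr]
  · rcases hPre with h | ⟨hl0, hrA, hrD, hrows⟩
    · omega
    have hrows' : ∀ i : Nat, i < dp.length → right < ((dp.getD i []).length : Int) := by
      intro i hi
      have hmem : dp.getD i [] ∈ dp := by
        rw [List.getD_eq_getElem _ _ hi]
        exact List.getElem_mem hi
      exact hrows _ hmem
    have hA := pvA_main me arr dp left right hl0 hrD hrows' (right - left + 1).toNat me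
      left right dp (le_refl _) (le_refl _) (le_refl _) ((pvT_root me left right).symm)
      ⟨pvShape_refl dp, fun l r _ _ _ => Or.inl rfl⟩
    unfold dfs
    rw [hA.1]
    rw [dfs_alt_eq, if_neg hlr]
    by_cases hc : pvGet2 dp left right ≠ -1
    · rw [if_pos hc, pvV_memo me arr dp left right hlr hc]
    · rw [if_neg hc]
      rw [not_not] at hc
      have h0 : pvInvO me arr dp left right 0 dp :=
        ⟨pvShape_refl dp, fun l r _ _ _ => ⟨fun h => absurd h (by omega), fun _ => rfl⟩⟩
      have hB := pvB_outer me arr dp left right hl0 hrD hrows'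
        (right - left + 1).toNat 0 dp (by omega) (le_refl _) h0
      have hcell := (hB.2 left right (le_refl _) (by omega) (le_refl _)).1 (by omega)
      rw [hcell, pvT_root]
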